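-- pv_equiv track=rewrite | github.com/pypi-data/pypi-mirror-300 | packages/sentineltools/sentineltools-0.12.tar.gz/sentineltools-0.12/sentineltools/utils/negex.py | _remove_consecutive_splits
-- ===== SOURCE A (Python) =====
-- def _remove_consecutive_splits(splits, strings_to_check: list[str] = None) -> list[tuple[str, int, int]]:
--     """
--     Removes all but the first occurrence of each section of consecutive duplicate tuples
--     based on the first element of the tuple. If strings_to_check is provided, only those
--     strings will be checked for consecutive duplicates.
--
--     :param data: List of tuples where each tuple contains a string as its first element.
--     :param strings_to_check: List of strings for which consecutive duplicates should be removed.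
--     :returns: A list with consecutive duplicates removed based on the provided strings_to_check.
--     """
--     if not splits:
--         return []
--
--     if strings_to_check is None:
--         strings_to_check = set(tup[0] for tup in splits)
--
--     result = [splits[0]]  # Start with the first item
--     for i in range(1, len(splits)):
--         if splits[i][0] != splits[i-1][0] or splits[i][0] not in strings_to_check:
--             result.append(splits[i])
--
--     return result
-- ===== SOURCE B (Python) =====
-- def _remove_consecutive_splits(splits, strings_to_check: list[str] = None) -> list[tuple[str, int, int]]:
--     """Run-based rewrite: walk the list run by run (maximal blocks of equal
--     first element); emit only the run's first tuple when its key is checked,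
--     the whole run otherwise."""
--     result = []
--     i, n = 0, len(splits)
--     while i < n:
--         j = i + 1
--         while j < n and splits[j][0] == splits[i][0]:
--             j += 1
--         if strings_to_check is None or splits[i][0] in strings_to_check:
--             result.append(splits[i])
--         else:
--             result.extend(splits[i:j])
--         i = j
--     return result
-- ===== Notes on version B (the rewrite author's own statement) =====
-- stated objective: alternative
-- what changed: Replaces A's index loop comparing each element with its predecessor (after materialising a set of all keys for the None default) with a two-pointer walk that groups the list into maximal runs of equal first element and emits either the run's head or the whole run.
import Mathlib
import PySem

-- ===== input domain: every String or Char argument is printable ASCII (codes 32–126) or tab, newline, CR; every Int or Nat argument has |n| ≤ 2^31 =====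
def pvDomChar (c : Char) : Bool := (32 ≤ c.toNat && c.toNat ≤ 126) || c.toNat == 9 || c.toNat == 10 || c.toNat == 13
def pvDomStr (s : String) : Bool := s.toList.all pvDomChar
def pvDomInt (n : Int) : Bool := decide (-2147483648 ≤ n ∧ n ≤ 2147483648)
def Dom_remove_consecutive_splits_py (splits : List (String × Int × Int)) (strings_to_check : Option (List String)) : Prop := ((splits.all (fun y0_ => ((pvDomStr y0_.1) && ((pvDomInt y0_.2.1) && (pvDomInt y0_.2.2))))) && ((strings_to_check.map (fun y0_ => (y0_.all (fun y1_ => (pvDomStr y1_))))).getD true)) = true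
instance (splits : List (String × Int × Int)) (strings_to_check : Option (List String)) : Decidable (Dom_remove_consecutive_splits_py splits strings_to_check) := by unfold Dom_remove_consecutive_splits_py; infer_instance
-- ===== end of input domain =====

-- B walks the list run by run (two pointers) instead of A's predecessor-comparison index loop; same cost, different decomposition.

-- ===== PORT A =====
def remove_consecutive_splits_py (splits : List (String × Int × Int)) (strings_to_check : Option (List String)) : List (String × Int × Int) :=
  match splits with
  | [] => []
  | first :: _ =>
    let check : List String :=
      match strings_to_check with
      | none => PySem.Set.ofList (splits.map (fun t => t.1))
      | some l => l
    (PySem.List.pyRange 1 (splits.length : Int) 1).foldl (fun result i =>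
      match PySem.List.pyGet? splits i, PySem.List.pyGet? splits (i - 1) with
      | some cur, some prev =>
          if cur.1 != prev.1 || !check.contains cur.1 then result ++ [cur] else result
      | _, _ => result) [first]

-- ===== PORT B =====
def remove_consecutive_splits_py_alt (splits : List (String × Int × Int)) (strings_to_check : Option (List String)) : List (String × Int × Int) :=
  match splits with
  | [] => []
  | x :: xs =>
    let run := xs.takeWhile (fun y => y.1 == x.1)
    let rest := remove_consecutive_splits_py_alt (xs.dropWhile (fun y => y.1 == x.1)) strings_to_check
    if (match strings_to_check with | none => true | some l => l.contains x.1) then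
      x :: rest
    else
      x :: (run ++ rest)
termination_by splits.length
decreasing_by
  simp only [List.length_cons]
  exact Nat.lt_succ_of_le (List.length_dropWhile_le _ _)

-- ===== PRECONDITION & SPEC =====
def Spec_remove_consecutive_splits_py (splits : List (String × Int × Int)) (strings_to_check : Option (List String)) (out : List (String × Int × Int)) : Prop := out = remove_consecutive_splits_py_alt splits strings_to_check
instance (splits : List (String × Int × Int)) (strings_to_check : Option (List String)) (out : List (String × Int × Int)) : Decidable (Spec_remove_consecutive_splits_py splits strings_to_check out) := by unfold Spec_remove_consecutive_splits_py; infer_instance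

-- ===== CLAIM (what is proved, stated in full; the proofs are below) =====
def Claim_equal_remove_consecutive_splits_py : Prop := ∀ (splits : List (String × Int × Int)) (strings_to_check : Option (List String)), Dom_remove_consecutive_splits_py splits strings_to_check → Spec_remove_consecutive_splits_py splits strings_to_check (remove_consecutive_splits_py splits strings_to_check)

-- ===== LEMMAS AND PROOFS =====

/-- Common characterisation: keep y when its key differs from the previous key
or is not checked. -/
def filterAdj (check : String → Bool) : String → List (String × Int × Int) → List (String × Int × Int)
  | _, [] => []
  | k, y :: ys => (if y.1 != k || !check y.1 then [y] else []) ++ filterAdj check y.1 ys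

theorem loopA (check : List String) (full : List (String × Int × Int)) :
    ∀ (rest : List (String × Int × Int)) (i : Nat) (p : String × Int × Int)
      (acc : List (String × Int × Int)),
      full.drop i = rest → 1 ≤ i → full[i-1]? = some p →
      (PySem.List.pyRange (i : Int) (full.length : Int) 1).foldl (fun result j =>
        match PySem.List.pyGet? full j, PySem.List.pyGet? full (j - 1) with
        | some cur, some prev =>
            if cur.1 != prev.1 || !check.contains cur.1 then result ++ [cur] else result
        | _, _ => result) acc = acc ++ filterAdj check.contains p.1 rest := by
  intro rest
  induction rest with
  | nil =>
    intro i p acc hdrop _ _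
    have hlen : full.length ≤ i := by
      by_contra h
      have := List.drop_eq_nil_iff.mp hdrop
      omega
    rw [PySem.List.pyRange_one_eq_nil (by exact_mod_cast hlen)]
    simp [filterAdj]
  | cons y ys ih =>
    intro i p acc hdrop h1 hprev
    have hi : i < full.length := by
      by_contra h
      rw [List.drop_eq_nil_iff.mpr (by omega)] at hdrop
      simp at hdrop
    have hyi : full[i]? = some y := by
      have h0 : (full.drop i)[0]? = some y := by rw [hdrop]; rfl
      simp only [List.getElem?_drop] at h0
      simpa using h0
    rw [PySem.List.pyRange_one_cons (by exact_mod_cast hi)]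
    rw [List.foldl_cons]
    have hget1 : PySem.List.pyGet? full (i : Int) = some y := by
      rw [PySem.List.pyGet?_natCast]; exact hyi
    have hcast : (i : Int) - 1 = ((i - 1 : Nat) : Int) := by omega
    have hget2 : PySem.List.pyGet? full ((i : Int) - 1) = some p := by
      rw [hcast, PySem.List.pyGet?_natCast]; exact hprev
    have hstep : (match PySem.List.pyGet? full (i : Int), PySem.List.pyGet? full ((i:Int) - 1) with
        | some cur, some prev =>
            if cur.1 != prev.1 || !check.contains cur.1 then acc ++ [cur] else acc
        | _, _ => acc) = acc ++ (if y.1 != p.1 || !check.contains y.1 then [y] else []) := by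
      rw [hget1, hget2]
      split
      · next cur prev hc hp =>
        cases hc; cases hp
        split <;> simp
      · next f => exact (f y p rfl rfl).elim
    rw [hstep]
    have hdrop' : full.drop (i + 1) = ys := by
      simpa [List.tail_drop] using congrArg List.tail hdrop
    have hprev' : full[(i+1)-1]? = some y := by simpa using hyi
    have hicast : ((i : Int) + 1) = ((i + 1 : Nat) : Int) := by omega
    rw [hicast, ih (i+1) y _ hdrop' (by omega) hprev']
    simp [filterAdj, List.append_assoc]

theorem A_eq (x : String × Int × Int) (xs : List (String × Int × Int))
    (strings_to_check : Option (List String)) :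
    remove_consecutive_splits_py (x :: xs) strings_to_check =
      x :: filterAdj (fun s =>
        (match strings_to_check with
         | none => PySem.Set.ofList ((x :: xs).map (fun t : String × Int × Int => t.1))
         | some l => l).contains s) x.1 xs := by
  exact loopA (match strings_to_check with
    | none => PySem.Set.ofList ((x :: xs).map (fun t : String × Int × Int => t.1))
    | some l => l) (x :: xs) xs 1 x [x] (by simp) (by omega) (by simp)

/-- helper for B: key test. -/
def checkB (strings_to_check : Option (List String)) (s : String) : Bool :=
  match strings_to_check with | none => true | some l => l.contains s

theorem run_filterAdj (check : String → Bool) (k : String)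
    (l rest : List (String × Int × Int)) (hl : ∀ y ∈ l, y.1 = k) :
    filterAdj check k (l ++ rest) =
      (if check k then [] else l) ++ filterAdj check k rest := by
  induction l with
  | nil => simp
  | cons y ys ih =>
    have hy : y.1 = k := hl y (by simp)
    have ihs := ih (fun z hz => hl z (by simp [hz]))
    simp only [List.cons_append, filterAdj, hy, ihs]
    by_cases h : check k = true <;> simp [h]

theorem filterAdj_congr (check check' : String → Bool) :
    ∀ (l : List (String × Int × Int)) (k : String),
      (∀ y ∈ l, check y.1 = check' y.1) →
      filterAdj check k l = filterAdj check' k l := by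
  intro l
  induction l with
  | nil => intro k _; rfl
  | cons y ys ih =>
    intro k h
    have hy := h y (by simp)
    simp only [filterAdj, hy, ih y.1 (fun z hz => h z (by simp [hz]))]

theorem dropWhile_head_false {p : (String × Int × Int) → Bool}
    {l : List (String × Int × Int)} {z : String × Int × Int}
    {zs : List (String × Int × Int)} (h : l.dropWhile p = z :: zs) :
    p z = false := by
  induction l with
  | nil => simp at h
  | cons y ys ih =>
    rw [List.dropWhile_cons] at h
    by_cases hp : p y = true
    · rw [if_pos hp] at h; exact ih h
    · rw [if_neg hp] at h
      cases h; simpa using hp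

theorem B_eq (strings_to_check : Option (List String)) :
    ∀ (n : Nat) (xs : List (String × Int × Int)) (x : String × Int × Int),
      xs.length ≤ n →
      remove_consecutive_splits_py_alt (x :: xs) strings_to_check =
        x :: filterAdj (checkB strings_to_check) x.1 xs := by
  intro n
  induction n with
  | zero =>
    intro xs x hxs
    have : xs = [] := List.eq_nil_of_length_eq_zero (by omega)
    subst this
    unfold remove_consecutive_splits_py_alt
    cases strings_to_check <;> simp [remove_consecutive_splits_py_alt, filterAdj]
  | succ n ih =>
    intro xs x hxs
    have hsplit := List.takeWhile_append_dropWhile (p := fun y => y.1 == x.1) (l := xs)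
    have hrunkeys : ∀ y ∈ xs.takeWhile (fun y => y.1 == x.1), y.1 = x.1 := by
      intro y hy
      have := List.mem_takeWhile_imp hy
      simpa using this
    have hfa : filterAdj (checkB strings_to_check) x.1 xs =
        (if checkB strings_to_check x.1 then [] else xs.takeWhile (fun y => y.1 == x.1)) ++
          filterAdj (checkB strings_to_check) x.1 (xs.dropWhile (fun y => y.1 == x.1)) := by
      conv_lhs => rw [← hsplit]
      exact run_filterAdj _ _ _ _ hrunkeys
    have hcheck : (match strings_to_check with
        | none => true | some l => l.contains x.1) = checkB strings_to_check x.1 := rfl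
    cases hrest : xs.dropWhile (fun y => y.1 == x.1) with
    | nil =>
      unfold remove_consecutive_splits_py_alt
      simp only [hrest, hcheck, hfa]
      by_cases h : checkB strings_to_check x.1 = true <;>
        simp [h, remove_consecutive_splits_py_alt, filterAdj]
    | cons z zs =>
      have hz : z.1 ≠ x.1 := by
        have := dropWhile_head_false hrest
        simpa using this
      have hlen : zs.length ≤ n := by
        have h1 : (xs.dropWhile (fun y => y.1 == x.1)).length ≤ xs.length :=
          List.length_dropWhile_le _ _
        rw [hrest] at h1
        simp at h1; omega
      have hB := ih zs z hlen
      unfold remove_consecutive_splits_py_alt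
      simp only [hrest, hcheck, hfa, hB]
      have hfz : filterAdj (checkB strings_to_check) x.1 (z :: zs) =
          z :: filterAdj (checkB strings_to_check) z.1 zs := by
        simp [filterAdj, hz]
      rw [hfz]
      by_cases h : checkB strings_to_check x.1 = true <;> simp [h]

-- ===== VERDICT (by name: the statement is the Claim_ definition above) =====
theorem remove_consecutive_splits_py_spec : Claim_equal_remove_consecutive_splits_py := by
  intro splits strings_to_check _
  unfold Spec_remove_consecutive_splits_py
  cases splits with
  | nil => simp [remove_consecutive_splits_py, remove_consecutive_splits_py_alt]
  | cons x xs =>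
    rw [A_eq, B_eq strings_to_check xs.length xs x (le_refl _)]
    cases strings_to_check with
    | some l => rfl
    | none =>
      congr 1
      apply filterAdj_congr
      intro y hy
      simp [checkB]
      exact Or.inr ⟨y.2.1, y.2.2, by simpa using hy⟩
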